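-- pv_equiv track=rewrite | github.com/reycardo/advent_of_code | advent_of_code/src/2024/Day22/main.py | create_rolling_window_dict
-- ===== SOURCE A (Python) =====
-- def create_rolling_window_dict(a, b, window_size=4):
--     result = {}
--     for i in range(len(a) - window_size + 1):
--         window = tuple(a[i : i + window_size])
--         if window not in result:
--             value = b[i + window_size] if i + window_size < len(b) else None
--             result[window] = value
--     return result
-- ===== SOURCE B (Python) =====
-- def create_rolling_window_dict(a, b, window_size=4):
--     # Stage 1: one reverse pass with unconditional overwrite leaves each window
--     # mapped to the index of its FIRST occurrence (no membership guard needed).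
--     # Stage 2: iterate the distinct windows in first-occurrence order
--     # (dict.fromkeys) and look up the successor value of that first index.
--     n = len(a) - window_size + 1
--     windows = [tuple(a[i:i + window_size]) for i in range(n)]
--     first = {}
--     for i, w in reversed(list(enumerate(windows))):
--         first[w] = i
--     result = {}
--     for w in dict.fromkeys(windows):
--         j = first[w] + window_size
--         result[w] = b[j] if j < len(b) else None
--     return result
-- ===== Notes on version B (the rewrite author's own statement) =====
-- stated objective: alternative
-- what changed: A builds the dict in one guarded pass ('window not in result'); B is staged with no guard: a reverse enumeration pass whose unconditional overwrites leave each window's first index, then a loop over the deduplicated windows (dict.fromkeys) that looks up each first index's successor value.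
import Mathlib
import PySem

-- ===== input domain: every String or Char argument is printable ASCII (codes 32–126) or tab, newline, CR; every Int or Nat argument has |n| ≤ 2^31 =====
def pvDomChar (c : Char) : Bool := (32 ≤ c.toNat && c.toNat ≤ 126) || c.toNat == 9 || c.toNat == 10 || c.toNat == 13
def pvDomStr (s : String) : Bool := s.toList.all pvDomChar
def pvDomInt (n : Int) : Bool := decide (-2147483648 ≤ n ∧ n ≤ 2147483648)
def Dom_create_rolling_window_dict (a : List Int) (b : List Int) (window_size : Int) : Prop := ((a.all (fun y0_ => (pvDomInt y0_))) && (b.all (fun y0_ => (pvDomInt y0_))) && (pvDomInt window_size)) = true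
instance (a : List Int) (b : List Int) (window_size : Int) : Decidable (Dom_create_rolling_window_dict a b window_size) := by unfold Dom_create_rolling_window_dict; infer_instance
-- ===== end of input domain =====

-- B replaces A's guarded single pass by two guard-free stages: a reverse enumeration pass
-- whose overwrites record each window's first index, then a loop over the deduplicated
-- windows looking up that first index's successor value (alternative; same cost).


-- ===== PORT A =====
def create_rolling_window_dict (a : List Int) (b : List Int) (window_size : Int) : List (List Int × Option Int) :=
  ((PySem.List.pyRange 0 ((a.length : Int) - window_size + 1) 1).foldl
    (fun (result : PySem.Dict (List Int) (Option Int)) i =>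
      let window := PySem.List.slice a (some i) (some (i + window_size))
      if result.contains window then result
      else
        let value : Option Int :=
          if i + window_size < (b.length : Int) then PySem.List.pyGet? b (i + window_size) else none
        result.insert window value)
    PySem.Dict.empty).items

-- ===== PORT B =====
def create_rolling_window_dict_alt (a : List Int) (b : List Int) (window_size : Int) : List (List Int × Option Int) :=
  let n : Int := (a.length : Int) - window_size + 1
  let windows := (PySem.List.pyRange 0 n 1).map
    (fun i => PySem.List.slice a (some i) (some (i + window_size)))
  let first := ((PySem.List.enumerate windows 0).reverse).foldl
    (fun (d : PySem.Dict (List Int) Int) p => d.insert p.2 p.1) PySem.Dict.empty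
  -- Python's first[w] (w is always a key here); getD's default is unreachable
  ((PySem.List.dedup windows).foldl
    (fun (result : PySem.Dict (List Int) (Option Int)) w =>
      let j := first.getD w 0 + window_size
      result.insert w (if j < (b.length : Int) then PySem.List.pyGet? b j else none))
    PySem.Dict.empty).items

-- ===== PRECONDITION & SPEC =====
-- Pre_ excludes exactly the inputs where A raises: some iteration reaches b[i+window_size]
-- with i+window_size < -len(b) (only possible for window_size < -len(b)), an IndexError.
def Pre_create_rolling_window_dict (a : List Int) (b : List Int) (window_size : Int) : Prop :=
  0 < (a.length : Int) - window_size + 1 → -(b.length : Int) ≤ window_size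
instance (a : List Int) (b : List Int) (window_size : Int) : Decidable (Pre_create_rolling_window_dict a b window_size) := by unfold Pre_create_rolling_window_dict; infer_instance

def pvWitness_create_rolling_window_dict : List Int × List Int × Int := ([1, 2, 3, 1, 2], [9, 8, 7, 6, 5], 2)

def Spec_create_rolling_window_dict (a : List Int) (b : List Int) (window_size : Int) (out : List (List Int × Option Int)) : Prop := out = create_rolling_window_dict_alt a b window_size
instance (a : List Int) (b : List Int) (window_size : Int) (out : List (List Int × Option Int)) : Decidable (Spec_create_rolling_window_dict a b window_size out) := by unfold Spec_create_rolling_window_dict; infer_instance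

-- ===== CLAIM (what is proved, stated in full; the proofs are below) =====
def Claim_equal_create_rolling_window_dict : Prop := ∀ (a : List Int) (b : List Int) (window_size : Int), Dom_create_rolling_window_dict a b window_size → Pre_create_rolling_window_dict a b window_size → Spec_create_rolling_window_dict a b window_size (create_rolling_window_dict a b window_size)

-- ===== LEMMAS AND PROOFS =====

-- first-occurrence dedup of ws relative to the already-seen keys `seen`
def pvNewKeys {K : Type} [DecidableEq K] (seen : List K) : List K → List K
  | [] => []
  | w :: ws => if w ∈ seen then pvNewKeys seen ws else w :: pvNewKeys (w :: seen) ws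

-- what A's guarded loop appends: first-occurrence pairs (window, val of its index)
def pvBuild {K V : Type} [DecidableEq K] (val : Int → V) (o : Int) (seen : List K) : List K → List (K × V)
  | [] => []
  | w :: ws => if w ∈ seen then pvBuild val (o + 1) seen ws
               else (w, val o) :: pvBuild val (o + 1) (w :: seen) ws

lemma pvNewKeys_congr {K : Type} [DecidableEq K] (s t : List K) (ws : List K)
    (h : ∀ x, x ∈ s ↔ x ∈ t) : pvNewKeys s ws = pvNewKeys t ws := by
  induction ws generalizing s t with
  | nil => rfl
  | cons w ws ih =>
    simp only [pvNewKeys]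
    by_cases hw : w ∈ s
    · rw [if_pos hw, if_pos ((h w).mp hw)]; exact ih s t h
    · rw [if_neg hw, if_neg (fun hc => hw ((h w).mpr hc))]
      congr 1
      exact ih (w :: s) (w :: t) (by intro x; simp [h x])

lemma pvBuild_congr {K V : Type} [DecidableEq K] (val : Int → V) (o : Int) (s t : List K)
    (ws : List K) (h : ∀ x, x ∈ s ↔ x ∈ t) : pvBuild val o s ws = pvBuild val o t ws := by
  induction ws generalizing s t o with
  | nil => rfl
  | cons w ws ih =>
    simp only [pvBuild]
    by_cases hw : w ∈ s
    · rw [if_pos hw, if_pos ((h w).mp hw)]; exact ih (o + 1) s t h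
    · rw [if_neg hw, if_neg (fun hc => hw ((h w).mpr hc))]
      congr 1
      exact ih (o + 1) (w :: s) (w :: t) (by intro x; simp [h x])

lemma mem_pvNewKeys_not_seen {K : Type} [DecidableEq K] (seen ws : List K) (x : K)
    (hx : x ∈ pvNewKeys seen ws) : x ∉ seen := by
  induction ws generalizing seen with
  | nil => simp [pvNewKeys] at hx
  | cons w ws ih =>
    simp only [pvNewKeys] at hx
    by_cases hw : w ∈ seen
    · rw [if_pos hw] at hx; exact ih seen hx
    · rw [if_neg hw] at hx
      rcases List.mem_cons.mp hx with h | h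
      · subst h; exact hw
      · have := ih (w :: seen) h
        exact fun hc => this (List.mem_cons_of_mem w hc)

lemma mem_pvNewKeys_mem {K : Type} [DecidableEq K] (seen ws : List K) (x : K)
    (hx : x ∈ pvNewKeys seen ws) : x ∈ ws := by
  induction ws generalizing seen with
  | nil => simp [pvNewKeys] at hx
  | cons w ws ih =>
    simp only [pvNewKeys] at hx
    by_cases hw : w ∈ seen
    · rw [if_pos hw] at hx; exact List.mem_cons_of_mem w (ih seen hx)
    · rw [if_neg hw] at hx
      rcases List.mem_cons.mp hx with h | h
      · subst h; exact List.mem_cons_self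
      · exact List.mem_cons_of_mem w (ih (w :: seen) h)

-- A's guarded fold over an enumeration produces exactly pvBuild, appended to the items
lemma foldl_guard_eq_pvBuild (val : Int → Option Int) (ws : List (List Int)) (s : Int)
    (d : PySem.Dict (List Int) (Option Int)) (hnd : d.keys.Nodup) :
    ((PySem.List.enumerate ws s).foldl
      (fun d p => if d.contains p.2 then d else d.insert p.2 (val p.1)) d).items
    = d.items ++ pvBuild val s d.keys ws := by
  induction ws generalizing s d with
  | nil => simp [PySem.List.enumerate_nil, pvBuild]
  | cons w ws ih =>
    rw [PySem.List.enumerate_cons, List.foldl_cons]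
    simp only [pvBuild]
    by_cases hw : w ∈ d.keys
    · have hc : d.contains w = true := by
        rw [PySem.Dict.contains_eq_decide_mem_keys]; exact decide_eq_true hw
      rw [if_pos hw]
      simp only [hc, if_true]
      exact ih (s + 1) d hnd
    · have hc : d.contains w = false := by
        rw [PySem.Dict.contains_eq_decide_mem_keys]; exact decide_eq_false hw
      rw [if_neg hw]
      simp only [hc, Bool.false_eq_true, if_false]
      rw [ih (s + 1) (d.insert w (val s)) (PySem.Dict.nodup_keys_insert _ _ _ hnd)]
      rw [PySem.Dict.items_insert_of_not_contains d _ hc,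
          PySem.Dict.keys_insert_of_not_contains d _ hc]
      rw [pvBuild_congr val (s + 1) (d.keys ++ [w]) (w :: d.keys) ws (by intro x; simp [or_comm])]
      simp

-- pvBuild keeps, for each new key, val of its FIRST index in ws
lemma pvBuild_eq_map_pvNewKeys {K V : Type} [DecidableEq K] (val : Int → V) (o : Int)
    (seen ws : List K) :
    pvBuild val o seen ws = (pvNewKeys seen ws).map (fun w => (w, val (o + (ws.idxOf w : Int)))) := by
  induction ws generalizing o seen with
  | nil => rfl
  | cons w ws ih =>
    simp only [pvBuild, pvNewKeys]
    by_cases hw : w ∈ seen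
    · rw [if_pos hw, if_pos hw, ih (o + 1) seen]
      apply List.map_congr_left
      intro x hx
      have hxs : x ∉ seen := mem_pvNewKeys_not_seen seen ws x hx
      have hne : x ≠ w := fun h => hxs (h ▸ hw)
      rw [List.idxOf_cons_ne _ (by exact fun h => hne h.symm)]
      simp only [Prod.mk.injEq, true_and]
      congr 1
      push_cast; ring
    · rw [if_neg hw, if_neg hw, ih (o + 1) (w :: seen)]
      simp only [List.map_cons, List.idxOf_cons_self, Nat.cast_zero, add_zero]
      congr 1
      apply List.map_congr_left
      intro x hx
      have hxs : x ∉ (w :: seen) := mem_pvNewKeys_not_seen (w :: seen) ws x hx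
      have hne : x ≠ w := fun h => hxs (h ▸ List.mem_cons_self)
      rw [List.idxOf_cons_ne _ (by exact fun h => hne h.symm)]
      simp only [Prod.mk.injEq, true_and]
      congr 1
      push_cast; ring

-- Python's set/fromkeys dedup is pvNewKeys from an empty seen list
lemma foldl_setAdd_eq_pvNewKeys (s : List (List Int)) (ws : List (List Int)) :
    ws.foldl PySem.Set.add s = s ++ pvNewKeys s ws := by
  induction ws generalizing s with
  | nil => simp [pvNewKeys]
  | cons w ws ih =>
    rw [List.foldl_cons]
    simp only [pvNewKeys, PySem.Set.add]
    by_cases hw : w ∈ s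
    · have : PySem.Set.contains s w = true := by
        simp [PySem.Set.contains, List.contains_eq_mem, hw]
      rw [this, if_pos hw]
      simpa using ih s
    · have : PySem.Set.contains s w = false := by
        simp [PySem.Set.contains, List.contains_eq_mem, hw]
      rw [this, if_neg hw]
      simp only [Bool.false_eq_true, if_false]
      rw [ih (s ++ [w])]
      rw [pvNewKeys_congr (s ++ [w]) (w :: s) ws (by intro x; simp [or_comm])]
      simp

lemma dedup_eq_pvNewKeys (ws : List (List Int)) :
    PySem.List.dedup ws = pvNewKeys [] ws := by
  rw [PySem.List.dedup_eq_ofList, PySem.Set.ofList_eq_foldl]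
  simpa using foldl_setAdd_eq_pvNewKeys [] ws

-- the reverse insert-fold: the LAST write wins, i.e. the FIRST matching pair of qs
lemma get?_foldl_reverse_insert (qs : List (Int × List Int)) (d : PySem.Dict (List Int) Int)
    (w : List Int) :
    ((qs.reverse).foldl (fun d p => d.insert p.2 p.1) d).get? w
    = (match qs.find? (fun p => p.2 == w) with
       | some p => some p.1
       | none => d.get? w) := by
  induction qs generalizing d with
  | nil => simp
  | cons q qs ih =>
    rw [List.reverse_cons, List.foldl_append, List.foldl_cons, List.foldl_nil, List.find?_cons]
    by_cases hq : q.2 = w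
    · have : (q.2 == w) = true := by exact beq_iff_eq.mpr hq
      rw [this]
      subst hq
      exact PySem.Dict.get?_insert_self _ _ _
    · have : (q.2 == w) = false := by exact beq_eq_false_iff_ne.mpr hq
      rw [this]
      rw [PySem.Dict.get?_insert_of_ne _ _ (fun h => hq h.symm)]
      exact ih d

-- the first matching pair of an enumeration carries the first-occurrence index
lemma find?_enumerate_eq_idxOf (ws : List (List Int)) (s : Int) (w : List Int) (hw : w ∈ ws) :
    (PySem.List.enumerate ws s).find? (fun p => p.2 == w)
    = some (s + (ws.idxOf w : Int), w) := by
  induction ws generalizing s with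
  | nil => simp at hw
  | cons x ws ih =>
    rw [PySem.List.enumerate_cons, List.find?_cons]
    by_cases hx : x = w
    · have : (x == w) = true := beq_iff_eq.mpr hx
      rw [this]
      subst hx
      simp [List.idxOf_cons_self]
    · have : (x == w) = false := beq_eq_false_iff_ne.mpr hx
      rw [this]
      have hw' : w ∈ ws := by
        rcases List.mem_cons.mp hw with h | h
        · exact absurd h.symm hx
        · exact h
      rw [ih (s + 1) hw']
      rw [List.idxOf_cons_ne _ (by exact fun h => hx h)]
      simp only [Option.some.injEq, Prod.mk.injEq]
      constructor
      · push_cast; ring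
      · trivial

-- fresh distinct keys: B's plain insert loop appends its pairs
lemma items_foldl_insert_dedup (ws : List (List Int)) (v : List Int → Option Int) :
    ((PySem.List.dedup ws).foldl
      (fun (d : PySem.Dict (List Int) (Option Int)) w => d.insert w (v w)) PySem.Dict.empty).items
    = (PySem.List.dedup ws).map (fun w => (w, v w)) := by
  have h := PySem.Dict.items_foldl_insert_fresh (l := PySem.List.dedup ws)
    (k := fun w => w) (v := v) (d := PySem.Dict.empty)
    (by intro x hx; exact PySem.Dict.contains_empty x)
    (by simpa using PySem.List.nodup_dedup ws)
  simpa using h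

-- B's stage-1 dict looks up each window's first-occurrence index
lemma pvFirst_getD (ws : List (List Int)) (w : List Int) (hw : w ∈ ws) :
    (((PySem.List.enumerate ws 0).reverse).foldl
      (fun (d : PySem.Dict (List Int) Int) p => d.insert p.2 p.1) PySem.Dict.empty).getD w 0
    = (ws.idxOf w : Int) := by
  rw [PySem.Dict.getD_eq_get?_getD, get?_foldl_reverse_insert,
      find?_enumerate_eq_idxOf ws 0 w hw]
  simp

lemma pvIdxOf_beq_eq {A : Type} [DecidableEq A] [inst : BEq A] [LawfulBEq A] (w : A) (l : List A) :
    @List.idxOf A inst w l = @List.idxOf A instBEqOfDecidableEq w l := by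
  induction l with
  | nil => rfl
  | cons x l ih =>
    by_cases h : x = w
    · simp [h]
    · simp [h, ih]

lemma pvMain (a b : List Int) (W : Int) :
    create_rolling_window_dict a b W = create_rolling_window_dict_alt a b W := by
  by_cases hn : (a.length : Int) - W + 1 ≤ 0
  · unfold create_rolling_window_dict create_rolling_window_dict_alt
    simp [PySem.List.pyRange_one_eq_nil hn, PySem.List.enumerate_nil]
  · rw [not_le] at hn
    show ((PySem.List.pyRange 0 ((a.length : Int) - W + 1) 1).foldl
        (fun (d : PySem.Dict (List Int) (Option Int)) i =>
          if d.contains (PySem.List.slice a (some i) (some (i + W))) then d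
          else d.insert (PySem.List.slice a (some i) (some (i + W)))
            (if i + W < (b.length : Int) then PySem.List.pyGet? b (i + W) else none))
        PySem.Dict.empty).items
      = ((PySem.List.dedup ((PySem.List.pyRange 0 ((a.length : Int) - W + 1) 1).map
            (fun i => PySem.List.slice a (some i) (some (i + W))))).foldl
          (fun (d : PySem.Dict (List Int) (Option Int)) w =>
            d.insert w
              (if (((PySem.List.enumerate ((PySem.List.pyRange 0 ((a.length : Int) - W + 1) 1).map
                      (fun i => PySem.List.slice a (some i) (some (i + W)))) 0).reverse).foldl
                    (fun (d : PySem.Dict (List Int) Int) p => d.insert p.2 p.1)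
                    PySem.Dict.empty).getD w 0 + W < (b.length : Int)
               then PySem.List.pyGet? b
                  ((((PySem.List.enumerate ((PySem.List.pyRange 0 ((a.length : Int) - W + 1) 1).map
                        (fun i => PySem.List.slice a (some i) (some (i + W)))) 0).reverse).foldl
                      (fun (d : PySem.Dict (List Int) Int) p => d.insert p.2 p.1)
                      PySem.Dict.empty).getD w 0 + W)
               else none))
          PySem.Dict.empty).items
    set ws := (PySem.List.pyRange 0 ((a.length : Int) - W + 1) 1).map
        (fun i => PySem.List.slice a (some i) (some (i + W))) with hws
    rw [items_foldl_insert_dedup]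
    have henum : PySem.List.enumerate ws 0
        = (PySem.List.pyRange 0 ((a.length : Int) - W + 1) 1).map
            (fun j => (j, PySem.List.slice a (some j) (some (j + W)))) := by
      rw [PySem.List.enumerate_eq_map_pyRange ws ([] : List Int)]
      have hlen : PySem.List.len ws = (a.length : Int) - W + 1 := by
        simp only [hws, PySem.List.len, List.length_map, PySem.List.length_pyRange_one]
        omega
      rw [hlen]
      apply List.map_congr_left
      intro j hj
      obtain ⟨h0, h1⟩ := PySem.List.mem_pyRange_one.mp hj
      rw [hws, PySem.List.pyGetD_map_pyRange_of_nonneg _ _ _ _ h0 h1]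
    have hA : (PySem.List.pyRange 0 ((a.length : Int) - W + 1) 1).foldl
        (fun (d : PySem.Dict (List Int) (Option Int)) i =>
          if d.contains (PySem.List.slice a (some i) (some (i + W))) then d
          else d.insert (PySem.List.slice a (some i) (some (i + W)))
            (if i + W < (b.length : Int) then PySem.List.pyGet? b (i + W) else none))
        PySem.Dict.empty
        = (PySem.List.enumerate ws 0).foldl
          (fun (d : PySem.Dict (List Int) (Option Int)) p =>
            if d.contains p.2 then d
            else d.insert p.2
              (if p.1 + W < (b.length : Int) then PySem.List.pyGet? b (p.1 + W) else none))
          PySem.Dict.empty := by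
      rw [henum, List.foldl_map]
    rw [hA]
    have hfold := foldl_guard_eq_pvBuild
      (fun i => if i + W < (b.length : Int) then PySem.List.pyGet? b (i + W) else none)
      ws 0 PySem.Dict.empty (by simp [PySem.Dict.keys_empty])
    simp only [PySem.Dict.keys_empty] at hfold
    rw [show ((PySem.Dict.empty : PySem.Dict (List Int) (Option Int)).items) = [] from rfl] at hfold
    rw [List.nil_append] at hfold
    rw [hfold, pvBuild_eq_map_pvNewKeys, dedup_eq_pvNewKeys]
    apply List.map_congr_left
    intro w hw
    rw [pvFirst_getD ws w (mem_pvNewKeys_mem [] ws w hw)]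
    simp only [zero_add, pvIdxOf_beq_eq]

-- ===== VERDICT (by name: the statement is the Claim_ definition above) =====
theorem create_rolling_window_dict_spec : Claim_equal_create_rolling_window_dict := by
  intro a b W _ _
  exact pvMain a b W
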